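-- pv_equiv track=rewrite | github.com/Seb1776/holbertonschool-low_level_programming | 0x1C-makefiles/5-island_perimeter.py | iterate_island
-- ===== SOURCE A (Python) =====
-- def iterate_island(grid, row, col, max_row, max_col):
--     """Iterates throught the island checking for borders
--
--     Parameters
--     ----------
--     grid: bidimensional array
--         Grid that defines the island area
--     row: int
--         Current cell's row position
--     col: int
--         Current cell's col position
--     max_row: int
--         Grid's max row count
--     max_col: int
--         Grid's max col count
--     """
--
--     if row < 0 or row is max_row or col < 0 or col == max_col:
--         return 0
--
--     if grid[row][col] == 0 or grid[row][col] == 2: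
--         return 0
--
--     length = 0
--     grid[row][col] = 2
--
--     #Check above position
--     if row is 0 or grid[row - 1][col] == 0:
--         length += 1
--
--     #Check below position
--     if row is max_row - 1 or grid[row + 1][col] == 0:
--         length += 1
--
--     #Check left position
--     if col == 0 or grid[row][col - 1] == 0:
--         length += 1
--
--     #Check right position
--     if col == max_col - 1 or grid[row][col + 1] == 0:
--         length += 1
--
--     length += iterate_island(grid, row - 1, col, max_row, max_col)
--     length += iterate_island(grid, row + 1, col, max_row, max_col)
--     length += iterate_island(grid, row, col - 1, max_row, max_col)
--     length += iterate_island(grid, row, col + 1, max_row, max_col)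
--
--     return length
-- ===== SOURCE B (Python) =====
-- def iterate_island(grid, row, col, max_row, max_col):
--     """Iterative flood fill: explicit stack instead of recursion.
--
--     Same marking (cells set to 2) and same perimeter count as the
--     recursive version on well-formed inputs.
--     """
--     length = 0
--     stack = [(row, col)]
--     while stack:
--         r, c = stack.pop()
--         if r < 0 or r >= max_row or c < 0 or c >= max_col:
--             continue
--         if grid[r][c] == 0 or grid[r][c] == 2:
--             continue
--         grid[r][c] = 2
--         if r == 0 or grid[r - 1][c] == 0:
--             length += 1
--         if r == max_row - 1 or grid[r + 1][c] == 0: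
--             length += 1
--         if c == 0 or grid[r][c - 1] == 0:
--             length += 1
--         if c == max_col - 1 or grid[r][c + 1] == 0:
--             length += 1
--         # pushed so that (r-1,c) is popped first: same visit order as A
--         stack.append((r, c + 1))
--         stack.append((r, c - 1))
--         stack.append((r + 1, c))
--         stack.append((r - 1, c))
--     return length
-- ===== Notes on version B (the rewrite author's own statement) =====
-- stated objective: alternative
-- what changed: The recursive four-way DFS is replaced by an iterative flood fill over an explicit stack seeded with (row, col), popping cells, skipping water/visited/out-of-window cells, marking and counting border edges, and pushing the four neighbours; natural `>=` bound checks and `==` replace A's `is` identity tests, which Pre_ confines to the small-int range where they coincide.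
-- outside the precondition, e.g. on iterate_island([[1, 0]], 0, 0, 1, 3): A returns 4, B returns 4; on iterate_island([[1, 0], [0, 0]], 0, 0, 5, -2): A returns 4, B returns 0
import Mathlib
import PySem

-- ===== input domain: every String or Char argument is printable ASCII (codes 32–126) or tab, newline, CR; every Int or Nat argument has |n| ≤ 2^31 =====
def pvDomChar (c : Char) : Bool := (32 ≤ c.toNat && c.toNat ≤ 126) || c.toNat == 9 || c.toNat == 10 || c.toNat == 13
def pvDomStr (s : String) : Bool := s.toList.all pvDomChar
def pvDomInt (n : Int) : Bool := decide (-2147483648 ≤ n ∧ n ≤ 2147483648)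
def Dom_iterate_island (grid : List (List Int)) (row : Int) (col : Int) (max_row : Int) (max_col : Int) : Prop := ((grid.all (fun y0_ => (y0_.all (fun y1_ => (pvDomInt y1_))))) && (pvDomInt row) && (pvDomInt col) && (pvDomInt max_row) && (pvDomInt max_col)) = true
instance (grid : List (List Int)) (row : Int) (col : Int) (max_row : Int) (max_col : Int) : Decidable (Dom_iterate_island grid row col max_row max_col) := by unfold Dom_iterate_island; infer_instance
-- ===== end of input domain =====

-- B replaces A's recursive four-way DFS by an iterative flood fill over an explicit stack
-- (objective: alternative decomposition, same cost). Both Pythons mutate `grid` in place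
-- identically (marking visited land cells 2); the equivalence proved here is about the
-- return value.

-- ===== PORT A =====

-- grid[r][c]; the default 0 is never consulted under Pre_ (every executed read is in
-- range there, so this is exact); it only totalizes the two ports.
def pvCell (g : List (List Int)) (r c : Int) : Int :=
  PySem.List.pyGetD (PySem.List.pyGetD g r []) c 0

-- grid[r][c] = 2; only applied after the guards, with 0 ≤ r, 0 ≤ c and the cell in range,
-- where List.set is exactly Python's item assignment.
def pvMark (g : List (List Int)) (r c : Int) : List (List Int) :=
  if 0 ≤ r ∧ 0 ≤ c then g.set r.toNat ((g.getD r.toNat []).set c.toNat 2) else g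

-- number of cells that are neither water (0) nor marked (2): termination measure
def pvUnmarked (g : List (List Int)) : Nat :=
  (g.map (fun row => row.countP (fun v => v != 0 && v != 2))).sum

-- marking a live cell strictly decreases the measure (used by pvLoopB's termination proof
-- and by the equivalence lemmas below)
theorem pvCountP_set_lt : ∀ (row : List Int) (j : Nat), j < row.length →
    row.getD j 0 ≠ 0 → row.getD j 0 ≠ 2 →
    (row.set j 2).countP (fun v => v != 0 && v != 2) < row.countP (fun v => v != 0 && v != 2) := by
  intro row
  induction row with
  | nil => intro j h; simp at h
  | cons hd tl ih =>
    intro j hj h0 h2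
    cases j with
    | zero =>
      simp at h0 h2
      simp [h0, h2]
    | succ j =>
      simp at hj h0 h2
      have := ih j hj h0 h2
      simp [List.countP_cons]
      omega

theorem pvUnmarked_set_lt : ∀ (g : List (List Int)) (i j : Nat), i < g.length →
    j < (g.getD i []).length → (g.getD i []).getD j 0 ≠ 0 → (g.getD i []).getD j 0 ≠ 2 →
    pvUnmarked (g.set i ((g.getD i []).set j 2)) < pvUnmarked g := by
  intro g
  induction g with
  | nil => intro i j h; simp at h
  | cons hd tl ih =>
    intro i j hi hj h0 h2
    cases i with
    | zero =>
      simp at hj h0 h2 ⊢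
      have := pvCountP_set_lt hd j hj h0 h2
      simp [pvUnmarked]
      omega
    | succ i =>
      simp at hi hj h0 h2
      have := ih i j hi hj h0 h2
      simp [pvUnmarked] at this ⊢
      omega

theorem pvCell_nonneg (g : List (List Int)) (r c : Int) (hr : 0 ≤ r) (hc : 0 ≤ c) :
    pvCell g r c = (g.getD r.toNat []).getD c.toNat 0 := by
  simp [pvCell, PySem.List.pyGetD_of_nonneg _ _ hr, PySem.List.pyGetD_of_nonneg _ _ hc]

theorem pvUnmarked_mark_lt (g : List (List Int)) (r c : Int) (hr : 0 ≤ r) (hc : 0 ≤ c)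
    (h0 : pvCell g r c ≠ 0) (h2 : pvCell g r c ≠ 2) :
    pvUnmarked (pvMark g r c) < pvUnmarked g := by
  rw [pvCell_nonneg g r c hr hc] at h0 h2
  have hi : r.toNat < g.length := by
    by_contra h
    rw [show g.getD r.toNat [] = [] from List.getD_eq_default _ _ (by omega)] at h0
    simp at h0
  have hj : c.toNat < (g.getD r.toNat []).length := by
    by_contra h
    rw [List.getD_eq_default _ _ (by omega)] at h0
    simp at h0
  have := pvUnmarked_set_lt g r.toNat c.toNat hi hj h0 h2
  simpa [pvMark, hr, hc] using this

-- A's recursion, fuel-guarded (fuel only totalizes it: the sequence of four recursive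
-- calls threads the mutated grid, so the decrease of pvUnmarked across a call is not
-- visible to well-founded recursion; pvUnmarked grid + 1 fuel is always enough, as the
-- equivalence lemma pvStep shows). Python's `is` on ints is ported as `=`: Pre_ confines
-- every identity test to CPython's cached small-int range, where `is` and `==` coincide.
-- Returns (length, mutated grid) because the later recursive calls read the mutated grid.
def pvRecA : Nat → List (List Int) → Int → Int → Int → Int → Int × List (List Int)
  | 0, g, _, _, _, _ => (0, g)
  | Nat.succ f, g, row, col, max_row, max_col =>
    if row < 0 ∨ row = max_row ∨ col < 0 ∨ col = max_col then (0, g)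
    else if pvCell g row col = 0 ∨ pvCell g row col = 2 then (0, g)
    else
      let g0 := pvMark g row col
      let b : Int :=
        (if row = 0 ∨ pvCell g0 (row - 1) col = 0 then 1 else 0)
        + (if row = max_row - 1 ∨ pvCell g0 (row + 1) col = 0 then 1 else 0)
        + (if col = 0 ∨ pvCell g0 row (col - 1) = 0 then 1 else 0)
        + (if col = max_col - 1 ∨ pvCell g0 row (col + 1) = 0 then 1 else 0)
      let p1 := pvRecA f g0 (row - 1) col max_row max_col
      let p2 := pvRecA f p1.2 (row + 1) col max_row max_col
      let p3 := pvRecA f p2.2 row (col - 1) max_row max_col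
      let p4 := pvRecA f p3.2 row (col + 1) max_row max_col
      (b + p1.1 + p2.1 + p3.1 + p4.1, p4.2)

def iterate_island (grid : List (List Int)) (row : Int) (col : Int) (max_row : Int) (max_col : Int) : Int :=
  (pvRecA (pvUnmarked grid + 1) grid row col max_row max_col).1

-- ===== PORT B =====

-- B's while-loop over the explicit stack; Python's list end (the push/pop site) is the
-- list head here, so Source B's four appends become four conses in reverse order.
def pvLoopB (max_row max_col : Int) : List (Int × Int) → List (List Int) → Int → Int
  | [], _, length => length
  | (r, c) :: st, g, length =>
    if h1 : r < 0 ∨ max_row ≤ r ∨ c < 0 ∨ max_col ≤ c then pvLoopB max_row max_col st g length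
    else if h2 : pvCell g r c = 0 ∨ pvCell g r c = 2 then pvLoopB max_row max_col st g length
    else
      let g0 := pvMark g r c
      let b : Int :=
        (if r = 0 ∨ pvCell g0 (r - 1) c = 0 then 1 else 0)
        + (if r = max_row - 1 ∨ pvCell g0 (r + 1) c = 0 then 1 else 0)
        + (if c = 0 ∨ pvCell g0 r (c - 1) = 0 then 1 else 0)
        + (if c = max_col - 1 ∨ pvCell g0 r (c + 1) = 0 then 1 else 0)
      pvLoopB max_row max_col ((r - 1, c) :: (r + 1, c) :: (r, c - 1) :: (r, c + 1) :: st) g0 (length + b)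
  termination_by st g _ => 5 * pvUnmarked g + st.length
  decreasing_by
    · simp
    · simp
    · have := pvUnmarked_mark_lt g r c (by omega) (by omega)
        (fun h => h2 (Or.inl h)) (fun h => h2 (Or.inr h))
      simp only [List.length_cons]
      omega

def iterate_island_alt (grid : List (List Int)) (row : Int) (col : Int) (max_row : Int) (max_col : Int) : Int :=
  pvLoopB max_row max_col [(row, col)] grid 0

-- ===== PRECONDITION & SPEC =====
-- Pre_ admits starts an early guard rejects, starts on a physically readable water/visited
-- cell (A returns 0 at once), and land starts inside a declared window that the physical
-- grid covers. It excludes (a) land starts whose declared window is inconsistent with the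
-- physical grid (exceeds it, or is empty/negative while the start cell physically exists):
-- A then mostly raises IndexError, and where it happens to return, its value is an accident
-- of the physical row lengths rather than of the declared window, a corner no caller would
-- specify (see cites); and (b) max_row > 256 when the traversal can reach row = max_row,
-- where A's `is` identity tests on ints depend on CPython small-int interning.
def Pre_iterate_island (grid : List (List Int)) (row : Int) (col : Int) (max_row : Int) (max_col : Int) : Prop :=
  row < 0 ∨ col < 0 ∨ col = max_col ∨ (row = max_row ∧ max_row ≤ 256)
    ∨ (0 ≤ row ∧ 0 ≤ col ∧ row ≠ max_row ∧ col ≠ max_col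
        ∧ row < (grid.length : Int) ∧ col < ((grid.getD row.toNat []).length : Int)
        ∧ ((grid.getD row.toNat []).getD col.toNat 0 = 0 ∨ (grid.getD row.toNat []).getD col.toNat 0 = 2))
    ∨ (0 ≤ row ∧ 0 ≤ col ∧ row < max_row ∧ col < max_col ∧ max_row ≤ 256
        ∧ max_row ≤ (grid.length : Int)
        ∧ ∀ r ∈ grid.take max_row.toNat, max_col ≤ (r.length : Int))
instance (grid : List (List Int)) (row : Int) (col : Int) (max_row : Int) (max_col : Int) : Decidable (Pre_iterate_island grid row col max_row max_col) := by unfold Pre_iterate_island; infer_instance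

def pvWitness_iterate_island : List (List Int) × Int × Int × Int × Int := ([[1, 1], [1, 0]], 0, 0, 2, 2)

def Spec_iterate_island (grid : List (List Int)) (row : Int) (col : Int) (max_row : Int) (max_col : Int) (out : Int) : Prop := out = iterate_island_alt grid row col max_row max_col
instance (grid : List (List Int)) (row : Int) (col : Int) (max_row : Int) (max_col : Int) (out : Int) : Decidable (Spec_iterate_island grid row col max_row max_col out) := by unfold Spec_iterate_island; infer_instance

-- ===== CLAIM (what is proved, stated in full; the proofs are below) =====
def Claim_equal_iterate_island : Prop := ∀ (grid : List (List Int)) (row : Int) (col : Int) (max_row : Int) (max_col : Int), Dom_iterate_island grid row col max_row max_col → Pre_iterate_island grid row col max_row max_col → Spec_iterate_island grid row col max_row max_col (iterate_island grid row col max_row max_col)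

-- ===== LEMMAS AND PROOFS =====

-- invariant for the start cell and every stacked cell: it is rejected by a guard or lies
-- strictly inside the declared window (so A's `= max_row` and B's `≥ max_row` guards agree)
def pvOk (mr mc r c : Int) : Prop := r < 0 ∨ c < 0 ∨ r = mr ∨ c = mc ∨ (r < mr ∧ c < mc)

theorem pvRecA_mono : ∀ (f : Nat) (g : List (List Int)) (row col mr mc : Int),
    pvUnmarked (pvRecA f g row col mr mc).2 ≤ pvUnmarked g := by
  intro f
  induction f with
  | zero => intro g row col mr mc; simp [pvRecA]
  | succ f ih =>
    intro g row col mr mc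
    rw [pvRecA]
    split
    · simp
    · split
      · simp
      · rename_i hg hw
        simp only []
        have h1 := ih (pvMark g row col) (row - 1) col mr mc
        have h2 := ih (pvRecA f (pvMark g row col) (row - 1) col mr mc).2 (row + 1) col mr mc
        have h3 := ih (pvRecA f (pvRecA f (pvMark g row col) (row - 1) col mr mc).2 (row + 1) col mr mc).2 row (col - 1) mr mc
        have h4 := ih (pvRecA f (pvRecA f (pvRecA f (pvMark g row col) (row - 1) col mr mc).2 (row + 1) col mr mc).2 row (col - 1) mr mc).2 row (col + 1) mr mc
        have hm := pvUnmarked_mark_lt g row col (by omega) (by omega)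
          (fun h => hw (Or.inl h)) (fun h => hw (Or.inr h))
        omega

-- the key simulation: popping one Ok cell off B's stack computes exactly A's recursive
-- call on that cell (same length contribution, same mutated grid)
theorem pvStep (mr mc : Int) : ∀ (f : Nat) (g : List (List Int)) (r c : Int)
    (st : List (Int × Int)) (acc : Int), pvUnmarked g < f → pvOk mr mc r c →
    pvLoopB mr mc ((r, c) :: st) g acc
      = pvLoopB mr mc st (pvRecA f g r c mr mc).2 (acc + (pvRecA f g r c mr mc).1) := by
  intro f
  induction f with
  | zero => intro g r c st acc hf; omega
  | succ f ih =>
    intro g r c st acc hf hok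
    by_cases hA : r < 0 ∨ r = mr ∨ c < 0 ∨ c = mc
    · have hB : r < 0 ∨ mr ≤ r ∨ c < 0 ∨ mc ≤ c := by omega
      rw [pvRecA, if_pos hA, pvLoopB, dif_pos hB]
      simp
    · have hr0 : 0 ≤ r := by omega
      have hc0 : 0 ≤ c := by omega
      have hrm : r < mr ∧ c < mc := by
        unfold pvOk at hok; omega
      have hB : ¬ (r < 0 ∨ mr ≤ r ∨ c < 0 ∨ mc ≤ c) := by omega
      by_cases hw : pvCell g r c = 0 ∨ pvCell g r c = 2
      · rw [pvRecA, if_neg hA, if_pos hw, pvLoopB, dif_neg hB, dif_pos hw]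
        simp
      · have hm := pvUnmarked_mark_lt g r c hr0 hc0
          (fun h => hw (Or.inl h)) (fun h => hw (Or.inr h))
        have hb : pvLoopB mr mc ((r, c) :: st) g acc
            = pvLoopB mr mc ((r - 1, c) :: (r + 1, c) :: (r, c - 1) :: (r, c + 1) :: st)
                (pvMark g r c)
                (acc + ((if r = 0 ∨ pvCell (pvMark g r c) (r - 1) c = 0 then 1 else 0)
                  + (if r = mr - 1 ∨ pvCell (pvMark g r c) (r + 1) c = 0 then 1 else 0)
                  + (if c = 0 ∨ pvCell (pvMark g r c) r (c - 1) = 0 then 1 else 0)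
                  + (if c = mc - 1 ∨ pvCell (pvMark g r c) r (c + 1) = 0 then 1 else 0))) := by
          rw [pvLoopB, dif_neg hB, dif_neg hw]
        have h1 := pvRecA_mono f (pvMark g r c) (r - 1) c mr mc
        have h2 := pvRecA_mono f (pvRecA f (pvMark g r c) (r - 1) c mr mc).2 (r + 1) c mr mc
        have h3 := pvRecA_mono f (pvRecA f (pvRecA f (pvMark g r c) (r - 1) c mr mc).2 (r + 1) c mr mc).2 r (c - 1) mr mc
        rw [hb,
          ih (pvMark g r c) (r - 1) c _ _ (by omega) (by unfold pvOk; omega),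
          ih _ (r + 1) c _ _ (by omega) (by unfold pvOk; omega),
          ih _ r (c - 1) _ _ (by omega) (by unfold pvOk; omega),
          ih _ r (c + 1) _ _ (by omega) (by unfold pvOk; omega)]
        have hrec : pvRecA (f + 1) g r c mr mc
            = ((if r = 0 ∨ pvCell (pvMark g r c) (r - 1) c = 0 then (1:Int) else 0)
                  + (if r = mr - 1 ∨ pvCell (pvMark g r c) (r + 1) c = 0 then 1 else 0)
                  + (if c = 0 ∨ pvCell (pvMark g r c) r (c - 1) = 0 then 1 else 0)
                  + (if c = mc - 1 ∨ pvCell (pvMark g r c) r (c + 1) = 0 then 1 else 0)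
                + (pvRecA f (pvMark g r c) (r - 1) c mr mc).1
                + (pvRecA f (pvRecA f (pvMark g r c) (r - 1) c mr mc).2 (r + 1) c mr mc).1
                + (pvRecA f (pvRecA f (pvRecA f (pvMark g r c) (r - 1) c mr mc).2 (r + 1) c mr mc).2 r (c - 1) mr mc).1
                + (pvRecA f (pvRecA f (pvRecA f (pvRecA f (pvMark g r c) (r - 1) c mr mc).2 (r + 1) c mr mc).2 r (c - 1) mr mc).2 r (c + 1) mr mc).1,
              (pvRecA f (pvRecA f (pvRecA f (pvRecA f (pvMark g r c) (r - 1) c mr mc).2 (r + 1) c mr mc).2 r (c - 1) mr mc).2 r (c + 1) mr mc).2) := by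
          rw [pvRecA, if_neg hA, if_neg hw]
        rw [hrec]
        congr 1
        ring

-- ===== VERDICT (by name: the statement is the Claim_ definition above) =====
theorem iterate_island_spec : Claim_equal_iterate_island := by
  intro grid row col max_row max_col _ hpre
  unfold Spec_iterate_island iterate_island iterate_island_alt
  rcases hpre with h | h | h | h | hwater | hland
  case _ | _ | _ | _ =>
    rw [pvStep max_row max_col (pvUnmarked grid + 1) grid row col [] 0 (by omega)
      (by unfold pvOk; omega)]
    simp [pvLoopB]
  case _ =>
    -- start on a readable water/visited cell: A returns 0 immediately, B skips the one cell
    obtain ⟨hr0, hc0, hrne, hcne, hrlen, hclen, hcell⟩ := hwater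
    have hc : pvCell grid row col = 0 ∨ pvCell grid row col = 2 := by
      rw [pvCell_nonneg grid row col hr0 hc0]; exact hcell
    have hA : (pvRecA (pvUnmarked grid + 1) grid row col max_row max_col).1 = 0 := by
      rw [pvRecA, if_neg (by omega), if_pos hc]
    have hB : pvLoopB max_row max_col [(row, col)] grid 0 = 0 := by
      by_cases hB1 : row < 0 ∨ max_row ≤ row ∨ col < 0 ∨ max_col ≤ col
      · rw [pvLoopB, dif_pos hB1, pvLoopB]
      · rw [pvLoopB, dif_neg hB1, dif_pos hc, pvLoopB]
    rw [hA, hB]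
  case _ =>
    rw [pvStep max_row max_col (pvUnmarked grid + 1) grid row col [] 0 (by omega)
      (by unfold pvOk; omega)]
    simp [pvLoopB]
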